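-- pv_equiv track=rewrite | github.com/the4chancup/pes-fmdl-blender | pes-fmdl/FmdlMeshSplitting.py | computeDescendentBones
-- ===== SOURCE A (Python) =====
-- def computeDescendentBones(parentBones):
-- 	childBones = {}
-- 	for (child, parent) in parentBones.items():
-- 		if parent not in childBones:
-- 			childBones[parent] = set()
-- 		childBones[parent].add(child)
--
-- 	descendentBones = {}
-- 	def descendents(bone, descendentBones):
-- 		if bone in descendentBones:
-- 			return descendentBones[bone]
-- 		if bone not in childBones:
-- 			descendentBones[bone] = set()
-- 			return descendentBones[bone]
-- 		descendentSet = childBones[bone].copy()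
-- 		for child in childBones[bone]:
-- 			descendentSet |= descendents(child, descendentBones)
-- 		descendentBones[bone] = descendentSet
-- 		return descendentBones[bone]
-- 	for bone in parentBones.keys():
-- 		descendents(bone, descendentBones)
--
-- 	return descendentBones
-- ===== SOURCE B (Python) =====
-- def computeDescendentBones(parentBones):
-- 	childBones = {}
-- 	for (child, parent) in parentBones.items():
-- 		childBones.setdefault(parent, []).append(child)
--
-- 	descendentBones = {}
-- 	for root in parentBones:
-- 		stack = [(root, False)]
-- 		while stack:
-- 			(bone, expanded) = stack.pop()
-- 			if expanded:
-- 				descendentSet = set(childBones[bone])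
-- 				for child in childBones[bone]:
-- 					descendentSet |= descendentBones[child]
-- 				descendentBones[bone] = descendentSet
-- 			elif bone in descendentBones:
-- 				continue
-- 			elif bone not in childBones:
-- 				descendentBones[bone] = set()
-- 			else:
-- 				stack.append((bone, True))
-- 				for child in reversed(childBones[bone]):
-- 					stack.append((child, False))
--
-- 	return descendentBones
-- ===== Notes on version B (the rewrite author's own statement) =====
-- stated objective: alternative
-- what changed: Replaces A's recursive memoized depth-first helper (function call per bone, Python recursion) by an explicit-stack iterative post-order traversal with two-phase stack frames over a list-valued child-adjacency map built with setdefault, so descendant sets are assembled from the memo when a bone's frame is revisited instead of from recursive return values.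
import Mathlib
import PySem

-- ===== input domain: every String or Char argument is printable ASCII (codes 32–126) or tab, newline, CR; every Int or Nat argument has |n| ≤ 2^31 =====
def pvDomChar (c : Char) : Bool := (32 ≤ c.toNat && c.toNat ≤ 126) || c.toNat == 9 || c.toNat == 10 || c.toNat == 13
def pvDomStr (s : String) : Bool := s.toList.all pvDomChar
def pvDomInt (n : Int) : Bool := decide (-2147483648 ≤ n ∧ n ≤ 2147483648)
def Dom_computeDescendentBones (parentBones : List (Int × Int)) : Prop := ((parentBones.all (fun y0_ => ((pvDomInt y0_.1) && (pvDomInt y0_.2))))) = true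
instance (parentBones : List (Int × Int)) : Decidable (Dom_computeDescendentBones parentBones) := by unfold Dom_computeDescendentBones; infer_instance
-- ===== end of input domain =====

-- B replaces A's recursive memoized depth-first search by an explicit-stack iterative
-- post-order traversal over a list-valued child-adjacency map (objective: alternative).

-- ===== PORT A =====
-- childBones loop: if parent not in childBones: childBones[parent] = set(); childBones[parent].add(child)
def pvChildBonesA (items : List (Int × Int)) : PySem.Dict Int (PySem.Set Int) :=
  items.foldl (fun cb q => cb.modify q.2 PySem.Set.empty (fun s => PySem.Set.add s q.1)) PySem.Dict.empty

-- the recursive helper `descendents`; fuel only makes the Python recursion structural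
-- (on inputs admitted by Pre_ the fuel is never exhausted, see pvDescA_success below)
def pvDescA (cb : PySem.Dict Int (PySem.Set Int)) :
    Nat → Int → PySem.Dict Int (PySem.Set Int) →
      Option (PySem.Set Int × PySem.Dict Int (PySem.Set Int))
  | 0, _, _ => none
  | f + 1, bone, memo =>
    match memo.get? bone with
    | some s => some (s, memo)
    | none =>
      match cb.get? bone with
      | none => some (PySem.Set.empty, memo.insert bone PySem.Set.empty)
      | some ch =>
        match ch.foldl
            (fun acc c => acc.bind (fun sm =>
              (pvDescA cb f c sm.2).map (fun r => (PySem.Set.union sm.1 r.1, r.2))))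
            (some (ch, memo)) with
        | none => none
        | some (s, m) => some (s, m.insert bone s)

def computeDescendentBones (parentBones : List (Int × Int)) : List (Int × List Int) :=
  let d := PySem.Dict.ofList parentBones
  let cb := pvChildBonesA d.items
  let n := d.keys.length
  d.keys.foldl (fun m bone =>
      match pvDescA cb (n + 2) bone m with
      | some r => r.2
      | none => m) PySem.Dict.empty |>.items

-- ===== PORT B =====
-- childBones.setdefault(parent, []).append(child)
def pvChildBonesB (items : List (Int × Int)) : PySem.Dict Int (List Int) :=
  items.foldl (fun cb q => cb.modify q.2 [] (fun l => l ++ [q.1])) PySem.Dict.empty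

-- the `while stack:` loop; fuel only makes the while loop structural (never exhausted
-- under Pre_); `childBones[bone]` in the expanded branch is getD because a True frame
-- is only ever pushed for a bone that is a key of childBones, and `descendentBones[child]`
-- is getD because every child frame was popped (and so bound) before its True frame.
def pvRunB (cb : PySem.Dict Int (List Int)) :
    Nat → List (Int × Bool) → PySem.Dict Int (PySem.Set Int) →
      Option (PySem.Dict Int (PySem.Set Int))
  | 0, _, _ => none
  | _ + 1, [], memo => some memo
  | f + 1, (bone, expanded) :: st, memo =>
    if expanded then
      let ch := cb.getD bone []
      let s := ch.foldl (fun s c => PySem.Set.union s (memo.getD c PySem.Set.empty))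
        (PySem.Set.ofList ch)
      pvRunB cb f st (memo.insert bone s)
    else if memo.contains bone then
      pvRunB cb f st memo
    else
      match cb.get? bone with
      | none => pvRunB cb f st (memo.insert bone PySem.Set.empty)
      | some ch => pvRunB cb f (ch.map (fun c => (c, false)) ++ (bone, true) :: st) memo

def computeDescendentBones_alt (parentBones : List (Int × Int)) : List (Int × List Int) :=
  let d := PySem.Dict.ofList parentBones
  let cb := pvChildBonesB d.items
  let n := d.keys.length
  d.keys.foldl (fun m root =>
      match pvRunB cb ((n + 2) * (n + 1) + 2) [(root, false)] m with
      | some m' => m'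
      | none => m) PySem.Dict.empty |>.items

-- ===== PRECONDITION & SPEC =====
-- upward parent-pointer chase: some k = the chain leaves the key set after k steps
def pvChase (d : PySem.Dict Int Int) : Nat → Int → Option Nat
  | 0, _ => none
  | k + 1, x =>
    match d.get? x with
    | none => some 0
    | some p => (pvChase d k p).map (· + 1)

-- Pre_ excludes exactly the cyclic parent maps: on them Python A raises RecursionError
-- (and B's while loop does not terminate).  Acyclic = from every bone the upward
-- parent chain leaves the key set (within |keys| steps, by pigeonhole).
def Pre_computeDescendentBones (parentBones : List (Int × Int)) : Prop :=
  ∀ k ∈ (PySem.Dict.ofList parentBones).keys,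
    (pvChase (PySem.Dict.ofList parentBones)
      ((PySem.Dict.ofList parentBones).keys.length + 1) k).isSome = true

instance (parentBones : List (Int × Int)) : Decidable (Pre_computeDescendentBones parentBones) := by
  unfold Pre_computeDescendentBones; infer_instance

def pvWitness_computeDescendentBones : (List (Int × Int)) := [(1, 2), (2, 3), (4, 2)]

def Spec_computeDescendentBones (parentBones : List (Int × Int)) (out : List (Int × List Int)) : Prop := out = computeDescendentBones_alt parentBones
instance (parentBones : List (Int × Int)) (out : List (Int × List Int)) : Decidable (Spec_computeDescendentBones parentBones out) := by unfold Spec_computeDescendentBones; infer_instance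

-- ===== CLAIM (what is proved, stated in full; the proofs are below) =====
def Claim_equal_computeDescendentBones : Prop := ∀ (parentBones : List (Int × Int)), Dom_computeDescendentBones parentBones → Pre_computeDescendentBones parentBones → Spec_computeDescendentBones parentBones (computeDescendentBones parentBones)

-- ===== LEMMAS AND PROOFS =====

-- a failed step poisons A's children fold
theorem pvFoldA_none (cb : PySem.Dict Int (PySem.Set Int)) (f : Nat) (ch : List Int) :
    ch.foldl (fun acc c => acc.bind (fun sm =>
      (pvDescA cb f c sm.2).map (fun r => (PySem.Set.union sm.1 r.1, r.2)))) none = none := by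
  induction ch with
  | nil => rfl
  | cons c ch ih => simpa using ih

-- the while loop is fuel-monotone
theorem pvRunB_mono (cb : PySem.Dict Int (List Int)) :
    ∀ (g : Nat) (st : List (Int × Bool)) (m r : PySem.Dict Int (PySem.Set Int)),
      pvRunB cb g st m = some r → pvRunB cb (g + 1) st m = some r := by
  intro g
  induction g with
  | zero => intro st m r h; simp [pvRunB] at h
  | succ g ih =>
    intro st m r h
    match st with
    | [] => simpa [pvRunB] using h
    | (bone, expanded) :: st =>
      rw [pvRunB] at h ⊢
      by_cases he : expanded
      · simp only [he, if_true] at h ⊢; exact ih _ _ _ h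
      · simp only [he] at h ⊢
        by_cases hc : m.contains bone
        · simp only [hc, if_true] at h ⊢; exact ih _ _ _ h
        · simp only [hc] at h ⊢
          cases hcb : cb.get? bone with
          | none => simp only [hcb] at h; exact ih _ _ _ h
          | some ch => simp only [hcb] at h; exact ih _ _ _ h

theorem pvRunB_mono_le (cb : PySem.Dict Int (List Int)) {g g' : Nat} (hle : g ≤ g')
    (st : List (Int × Bool)) (m r : PySem.Dict Int (PySem.Set Int))
    (h : pvRunB cb g st m = some r) : pvRunB cb g' st m = some r := by
  induction g' with
  | zero => exact (Nat.le_zero.mp hle ▸ h)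
  | succ g' ih =>
    rcases Nat.lt_or_ge g (g' + 1) with hlt | hge
    · exact pvRunB_mono cb g' st m r (ih (by omega))
    · have : g = g' + 1 := by omega
      exact this ▸ h

-- descendents() never disturbs an existing memo binding
theorem pvDescA_persist (cb : PySem.Dict Int (PySem.Set Int)) :
    ∀ (f : Nat) (b : Int) (m : PySem.Dict Int (PySem.Set Int)) (s : PySem.Set Int)
      (m' : PySem.Dict Int (PySem.Set Int)), pvDescA cb f b m = some (s, m') →
      ∀ (k : Int) (v : PySem.Set Int), m.get? k = some v → m'.get? k = some v := by
  intro f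
  induction f with
  | zero => intro b m s m' h; simp [pvDescA] at h
  | succ f ih =>
    intro b m s m' h k v hk
    rw [pvDescA] at h
    cases hmb : m.get? b with
    | some s0 => simp only [hmb] at h; cases h; exact hk
    | none =>
      simp only [hmb] at h
      cases hcb : cb.get? b with
      | none =>
        simp only [hcb] at h; cases h
        have hne : k ≠ b := fun he => by rw [he, hmb] at hk; cases hk
        rw [PySem.Dict.get?_insert_of_ne _ _ hne]; exact hk
      | some ch =>
        simp only [hcb] at h
        have hfold : ∀ (l : List Int) (s0 : PySem.Set Int) (m0 : PySem.Dict Int (PySem.Set Int))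
            (s1 : PySem.Set Int) (m1 : PySem.Dict Int (PySem.Set Int)),
            l.foldl (fun acc c => acc.bind (fun sm =>
              (pvDescA cb f c sm.2).map (fun r => (PySem.Set.union sm.1 r.1, r.2))))
              (some (s0, m0)) = some (s1, m1) →
            ∀ (k : Int) (v : PySem.Set Int), m0.get? k = some v → m1.get? k = some v := by
          intro l
          induction l with
          | nil => intro s0 m0 s1 m1 hl k v hk; cases hl; exact hk
          | cons c l ihl =>
            intro s0 m0 s1 m1 hl k v hk
            simp only [List.foldl_cons, Option.bind_some] at hl
            cases hd : pvDescA cb f c m0 with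
            | none => simp only [hd] at hl; simp only [Option.map_none] at hl
                      rw [pvFoldA_none] at hl; cases hl
            | some rm =>
              simp only [hd] at hl; simp only [Option.map_some] at hl
              exact ihl _ _ _ _ hl k v (ih c m0 rm.1 rm.2 (by rw [hd]) k v hk)
        cases hfl : ch.foldl (fun acc c => acc.bind (fun sm =>
            (pvDescA cb f c sm.2).map (fun r => (PySem.Set.union sm.1 r.1, r.2))))
            (some (ch, m)) with
        | none => simp only [hfl] at h; cases h
        | some sm =>
          simp only [hfl] at h; cases h
          have hk1 := hfold ch ch m sm.1 sm.2 (by rw [hfl]) k v hk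
          have hne : k ≠ b := fun he => by rw [he, hmb] at hk; cases hk
          rw [PySem.Dict.get?_insert_of_ne _ _ hne]; exact hk1

-- the returned set is the final memo binding of the argument
theorem pvDescA_bind (cb : PySem.Dict Int (PySem.Set Int)) (f : Nat) (b : Int)
    (m : PySem.Dict Int (PySem.Set Int)) (s : PySem.Set Int)
    (m' : PySem.Dict Int (PySem.Set Int)) (h : pvDescA cb f b m = some (s, m')) :
    m'.get? b = some s := by
  match f with
  | 0 => simp [pvDescA] at h
  | f + 1 =>
    rw [pvDescA] at h
    cases hmb : m.get? b with
    | some s0 => simp only [hmb] at h; cases h; exact hmb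
    | none =>
      simp only [hmb] at h
      cases hcb : cb.get? b with
      | none => simp only [hcb] at h; cases h; exact PySem.Dict.get?_insert_self _ _ _
      | some ch =>
        simp only [hcb] at h
        cases hfl : ch.foldl (fun acc c => acc.bind (fun sm =>
            (pvDescA cb f c sm.2).map (fun r => (PySem.Set.union sm.1 r.1, r.2))))
            (some (ch, m)) with
        | none => simp only [hfl] at h; cases h
        | some sm => simp only [hfl] at h; cases h; exact PySem.Dict.get?_insert_self _ _ _

-- parent chasing: fuel-monotone, and the step count is below the fuel
theorem pvChase_mono (d : PySem.Dict Int Int) :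
    ∀ (k : Nat) (x : Int) (j : Nat), pvChase d k x = some j → pvChase d (k + 1) x = some j := by
  intro k
  induction k with
  | zero => intro x j h; simp [pvChase] at h
  | succ k ih =>
    intro x j h
    rw [pvChase] at h ⊢
    cases hp : d.get? x with
    | none => simp only [hp] at h; exact h
    | some p =>
      simp only [hp] at h
      cases hc : pvChase d k p with
      | none => simp only [hc] at h; cases h
      | some jp => simp only [hc] at h; simp only [ih p jp hc]; exact h

theorem pvChase_lt (d : PySem.Dict Int Int) :
    ∀ (k : Nat) (x : Int) (j : Nat), pvChase d k x = some j → j < k := by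
  intro k
  induction k with
  | zero => intro x j h; simp [pvChase] at h
  | succ k ih =>
    intro x j h
    rw [pvChase] at h
    cases hp : d.get? x with
    | none => simp only [hp] at h; cases h; omega
    | some p =>
      simp only [hp] at h
      cases hc : pvChase d k p with
      | none => simp only [hc] at h; cases h
      | some jp => simp only [hc, Option.map_some] at h; cases h; have := ih p jp hc; omega

-- MAIN SIMULATION: one completed call of A's recursive descendents() is replayed exactly
-- by B's stack machine, at a fuel budget linear in the number of new memo entries
theorem pvDescA_sim (cb : PySem.Dict Int (PySem.Set Int)) (keys : List Int) (esc : Int → Nat)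
    (n : Nat)
    (Hch : ∀ b ch, cb.get? b = some ch →
      ch.Nodup ∧ ch.length ≤ n ∧ ∀ c ∈ ch, c ∈ keys ∧ esc c = esc b + 1) :
    ∀ (f : Nat) (b : Int) (m : PySem.Dict Int (PySem.Set Int)) (s : PySem.Set Int)
      (m' : PySem.Dict Int (PySem.Set Int)), b ∈ keys → pvDescA cb f b m = some (s, m') →
      ∃ ns : List Int, m'.keys = m.keys ++ ns ∧ (∀ k ∈ ns, k ∈ keys ∧ esc b ≤ esc k) ∧
        (m.keys.Nodup → m'.keys.Nodup) ∧
        ∀ (g : Nat) (st : List (Int × Bool)) (r : PySem.Dict Int (PySem.Set Int)),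
          pvRunB cb g st m' = some r →
          pvRunB cb (g + (n + 2) * ns.length + 1) ((b, false) :: st) m = some r := by
  intro f
  induction f with
  | zero => intro b m s m' hb h; simp [pvDescA] at h
  | succ f ihf =>
    intro b m s m' hb h
    rw [pvDescA] at h
    cases hmb : m.get? b with
    | some s0 =>
      simp only [hmb] at h; cases h
      refine ⟨[], by simp, by simp, fun hn => hn, ?_⟩
      intro g st r hrun
      simp only [List.length_nil, Nat.mul_zero, Nat.add_zero]
      rw [pvRunB]
      have hcont : m.contains b = true := by
        rw [PySem.Dict.contains_eq_isSome_get?, hmb]; rfl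
      simp only [hcont, Bool.false_eq_true, reduceIte]
      exact hrun
    | none =>
      simp only [hmb] at h
      have hcont : m.contains b = false := by
        rw [PySem.Dict.contains_eq_isSome_get?, hmb]; rfl
      cases hcb : cb.get? b with
      | none =>
        simp only [hcb] at h; cases h
        refine ⟨[b], PySem.Dict.keys_insert_of_not_contains m _ hcont, ?_, ?_, ?_⟩
        · intro k hk; simp at hk; subst hk; exact ⟨hb, Nat.le_refl _⟩
        · exact fun hn => PySem.Dict.nodup_keys_insert m b _ hn
        · intro g st r hrun
          have hfe : g + (n + 2) * ([b] : List Int).length + 1 = (g + (n + 2)) + 1 := by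
            simp
          rw [hfe, pvRunB]
          simp only [Bool.false_eq_true, reduceIte, hcont, hcb]
          exact pvRunB_mono_le cb (by omega) st _ r hrun
      | some ch =>
        simp only [hcb] at h
        obtain ⟨hnd, hlen, hc⟩ := Hch b ch hcb
        -- inner induction over the children list
        have Hfold : ∀ (l : List Int), (∀ c ∈ l, c ∈ keys ∧ esc c = esc b + 1) →
            ∀ (s0 : PySem.Set Int) (m0 : PySem.Dict Int (PySem.Set Int)) (s1 : PySem.Set Int)
              (m1 : PySem.Dict Int (PySem.Set Int)),
            l.foldl (fun acc c => acc.bind (fun sm =>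
              (pvDescA cb f c sm.2).map (fun r => (PySem.Set.union sm.1 r.1, r.2))))
              (some (s0, m0)) = some (s1, m1) →
            ∃ nsF : List Int, m1.keys = m0.keys ++ nsF ∧
              (∀ k ∈ nsF, k ∈ keys ∧ esc b + 1 ≤ esc k) ∧
              (m0.keys.Nodup → m1.keys.Nodup) ∧
              (∀ (k : Int) (v : PySem.Set Int), m0.get? k = some v → m1.get? k = some v) ∧
              s1 = l.foldl (fun t c => PySem.Set.union t (m1.getD c PySem.Set.empty)) s0 ∧
              ∀ (g : Nat) (st : List (Int × Bool)) (r : PySem.Dict Int (PySem.Set Int)),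
                pvRunB cb g st m1 = some r →
                pvRunB cb (g + (n + 2) * nsF.length + l.length)
                  (l.map (fun c => (c, false)) ++ st) m0 = some r := by
          intro l
          induction l with
          | nil =>
            intro _ s0 m0 s1 m1 hl
            cases hl
            exact ⟨[], by simp, by simp, fun hn => hn, fun k v hv => hv, rfl,
              by intro g st r hrun; simpa using hrun⟩
          | cons c l ihl =>
            intro hcs s0 m0 s1 m1 hl
            simp only [List.foldl_cons, Option.bind_some] at hl
            cases hd : pvDescA cb f c m0 with
            | none =>
              simp only [hd, Option.map_none] at hl
              rw [pvFoldA_none] at hl; cases hl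
            | some rm =>
              obtain ⟨r0, m0'⟩ := rm
              simp only [hd, Option.map_some] at hl
              obtain ⟨ns_c, hk_c, hprop_c, hnod_c, hsim_c⟩ :=
                ihf c m0 r0 m0' (hcs c (by simp)).1 hd
              obtain ⟨ns_t, hk_t, hprop_t, hnod_t, hpers_t, hs_t, hsim_t⟩ :=
                ihl (fun c' hc' => hcs c' (by simp [hc'])) _ _ _ _ hl
              have hcesc : esc c = esc b + 1 := (hcs c (by simp)).2
              refine ⟨ns_c ++ ns_t, ?_, ?_, ?_, ?_, ?_, ?_⟩
              · rw [hk_t, hk_c, List.append_assoc]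
              · intro k hk
                rcases List.mem_append.mp hk with hk | hk
                · obtain ⟨h1, h2⟩ := hprop_c k hk
                  exact ⟨h1, by omega⟩
                · exact hprop_t k hk
              · exact fun hn => hnod_t (hnod_c hn)
              · intro k v hv
                exact hpers_t k v (pvDescA_persist cb f c m0 r0 m0' hd k v hv)
              · have hr0 : m1.getD c PySem.Set.empty = r0 :=
                  PySem.Dict.getD_of_get?_eq_some _ _
                    (hpers_t c r0 (pvDescA_bind cb f c m0 r0 m0' hd))
                simp only [List.foldl_cons, hr0]
                exact hs_t
              · intro g st r hrun
                have h1 := hsim_t g st r hrun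
                have h2 := hsim_c (g + (n + 2) * ns_t.length + l.length)
                  (l.map (fun c => (c, false)) ++ st) r h1
                have hfe : g + (n + 2) * (ns_c ++ ns_t).length + (c :: l).length =
                    g + (n + 2) * ns_t.length + l.length + (n + 2) * ns_c.length + 1 := by
                  rw [List.length_append, List.length_cons, Nat.mul_add]; ring
                simp only [List.map_cons, List.cons_append]
                rw [hfe]
                exact h2
        cases hfl : ch.foldl (fun acc c => acc.bind (fun sm =>
            (pvDescA cb f c sm.2).map (fun r => (PySem.Set.union sm.1 r.1, r.2))))
            (some (ch, m)) with
        | none => simp only [hfl] at h; cases h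
        | some sm =>
          obtain ⟨s_c, m_c⟩ := sm
          simp only [hfl] at h; cases h
          obtain ⟨nsF, hkF, hpropF, hnodF, hpersF, hsF, hsimF⟩ := Hfold ch hc ch m s m_c hfl
          have hbns : b ∉ nsF := fun hmem => by
            have := (hpropF b hmem).2; omega
          have hbm : b ∉ m.keys := (PySem.Dict.get?_eq_none_iff_not_mem_keys m b).mp hmb
          have hcontc : m_c.contains b = false := by
            rw [PySem.Dict.contains_eq_decide_mem_keys, hkF]
            simp [hbm, hbns]
          refine ⟨nsF ++ [b], ?_, ?_, ?_, ?_⟩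
          · rw [PySem.Dict.keys_insert_of_not_contains m_c _ hcontc, hkF, List.append_assoc]
          · intro k hk
            rcases List.mem_append.mp hk with hk | hk
            · obtain ⟨h1, h2⟩ := hpropF k hk
              exact ⟨h1, by omega⟩
            · simp at hk; subst hk; exact ⟨hb, Nat.le_refl _⟩
          · exact fun hn => PySem.Dict.nodup_keys_insert m_c b _ (hnodF hn)
          · intro g st r hrun
            -- the (b, true) frame recomputes exactly A's descendant set from the memo
            have hgd : cb.getD b [] = ch := PySem.Dict.getD_of_get?_eq_some _ _ hcb
            have hT : pvRunB cb (g + 1) ((b, true) :: st) m_c = some r := by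
              rw [pvRunB]
              simp only [reduceIte, hgd, PySem.Set.ofList_eq_self_of_nodup ch hnd, ← hsF]
              exact hrun
            have h2 := hsimF (g + 1) ((b, true) :: st) r hT
            have hfe : g + (n + 2) * (nsF ++ [b] : List Int).length + 1 =
                (g + (n + 2) * nsF.length + n + 2) + 1 := by
              rw [List.length_append, Nat.mul_add]; simp; ring
            rw [hfe, pvRunB]
            simp only [Bool.false_eq_true, reduceIte, hcont, hcb]
            exact pvRunB_mono_le cb (by omega) _ _ r h2

-- on an acyclic parent map, A's recursion succeeds at fuel N + 2 (N bounds the chase depth)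
theorem pvDescA_success (cb : PySem.Dict Int (PySem.Set Int)) (keys : List Int) (esc : Int → Nat)
    (N : Nat) (HescB : ∀ b ∈ keys, esc b ≤ N)
    (Hch : ∀ b ch, cb.get? b = some ch → ∀ c ∈ ch, c ∈ keys ∧ esc c = esc b + 1) :
    ∀ (f : Nat) (b : Int) (m : PySem.Dict Int (PySem.Set Int)), b ∈ keys →
      N + 2 - esc b ≤ f → ∃ s m', pvDescA cb f b m = some (s, m') := by
  intro f
  induction f with
  | zero =>
    intro b m hb hf
    have := HescB b hb; omega
  | succ f ihf =>
    intro b m hb hf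
    rw [pvDescA]
    cases hmb : m.get? b with
    | some s0 => exact ⟨s0, m, rfl⟩
    | none =>
      cases hcb : cb.get? b with
      | none => exact ⟨PySem.Set.empty, m.insert b PySem.Set.empty, rfl⟩
      | some ch =>
        have HF : ∀ (l : List Int), (∀ c ∈ l, c ∈ keys ∧ esc c = esc b + 1) →
            ∀ (s0 : PySem.Set Int) (m0 : PySem.Dict Int (PySem.Set Int)), ∃ s1 m1,
            l.foldl (fun acc c => acc.bind (fun sm =>
              (pvDescA cb f c sm.2).map (fun r => (PySem.Set.union sm.1 r.1, r.2))))
              (some (s0, m0)) = some (s1, m1) := by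
          intro l
          induction l with
          | nil => exact fun _ s0 m0 => ⟨s0, m0, rfl⟩
          | cons c l ihl =>
            intro hcs s0 m0
            obtain ⟨hck, hce⟩ := hcs c (by simp)
            have hb' := HescB b hb
            have hc' := HescB c hck
            obtain ⟨r0, m0', hd⟩ := ihf c m0 hck (by omega)
            obtain ⟨s1, m1, hl⟩ := ihl (fun c' hc'' => hcs c' (by simp [hc''])) 
              (PySem.Set.union s0 r0) m0'
            exact ⟨s1, m1, by simp only [List.foldl_cons, Option.bind_some, hd,
              Option.map_some]; exact hl⟩
        obtain ⟨s1, m1, hfl⟩ := HF ch (Hch b ch hcb) ch m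
        exact ⟨s1, m1.insert b s1, by simp only [hfl]⟩

-- A's set-valued childBones map and B's list-valued one are the same association list
theorem pvCB_fold_eq : ∀ (l : List (Int × Int)), (l.map Prod.fst).Nodup →
    ∀ (acc : PySem.Dict Int (PySem.Set Int)),
    (∀ p c, c ∈ acc.getD p PySem.Set.empty → c ∉ l.map Prod.fst) →
    l.foldl (fun cb q => cb.modify q.2 PySem.Set.empty (fun s => PySem.Set.add s q.1)) acc =
    l.foldl (fun cb q => cb.modify q.2 [] (fun t => t ++ [q.1])) acc := by
  intro l
  induction l with
  | nil => intro _ acc _; rfl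
  | cons q l ihl =>
    intro hnd acc hinv
    simp only [List.foldl_cons]
    have hq1 : q.1 ∉ acc.getD q.2 PySem.Set.empty := fun hmem =>
      hinv q.2 q.1 hmem (by simp)
    have hstep : acc.modify q.2 PySem.Set.empty (fun s => PySem.Set.add s q.1) =
        acc.modify q.2 [] (fun t => t ++ [q.1]) := by
      simp only [PySem.Dict.modify]
      rw [PySem.Set.add_of_not_mem hq1]; rfl
    rw [hstep]
    refine ihl (by simpa using hnd.of_cons) _ ?_
    intro p c hmem
    have hmem' : c ∈ (acc.modify q.2 [] fun t => t ++ [q.1]).getD p [] := hmem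
    rw [PySem.Dict.getD_modify] at hmem'
    clear hmem
    by_cases hp : p = q.2
    · simp only [hp, if_true] at hmem'
      rcases List.mem_append.mp hmem' with hmem' | hmem'
      · exact fun hc => hinv q.2 c hmem' (by simp [hc])
      · simp at hmem'; subst hmem'
        simp only [List.map_cons] at hnd
        exact (List.nodup_cons.mp hnd).1
    · simp only [hp, if_false] at hmem'
      exact fun hc => hinv p c hmem' (by simp [hc])

theorem pvCB_eq (l : List (Int × Int)) (hnd : (l.map Prod.fst).Nodup) :
    pvChildBonesA l = pvChildBonesB l := by
  unfold pvChildBonesA pvChildBonesB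
  refine pvCB_fold_eq l hnd _ ?_
  intro p c hmem
  rw [PySem.Dict.getD_empty] at hmem
  cases hmem

-- the children of p are the keys whose parent is p, in key order
theorem pvCB_getD (l : List (Int × Int)) (p : Int) :
    (pvChildBonesB l).getD p [] = (l.filter (fun q => q.2 == p)).map Prod.fst := by
  have h := PySem.Dict.getD_foldl_modify_append (l.map (fun q => (q.2, q.1)))
    (PySem.Dict.empty : PySem.Dict Int (List Int)) p
  rw [List.foldl_map] at h
  simp only [PySem.Dict.getD_empty, List.nil_append, List.filter_map, List.map_map,
    Function.comp_def] at h
  unfold pvChildBonesB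
  exact h

-- ===== VERDICT (by name: the statement is the Claim_ definition above) =====
theorem computeDescendentBones_spec : Claim_equal_computeDescendentBones := by
  unfold Claim_equal_computeDescendentBones
  intro pb _ hpre
  unfold Spec_computeDescendentBones
  unfold Pre_computeDescendentBones at hpre
  simp only [computeDescendentBones, computeDescendentBones_alt]
  set d : PySem.Dict Int Int := PySem.Dict.ofList pb with hd
  set n : Nat := d.keys.length with hn
  have hknd : d.keys.Nodup := by rw [hd]; exact PySem.Dict.nodup_keys_ofList pb
  rw [pvCB_eq d.items hknd]
  set esc : Int → Nat := fun x => (pvChase d (n + 1) x).getD 0 with hesc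
  have hpre' : ∀ k ∈ d.keys, ∃ j, pvChase d (n + 1) k = some j := by
    intro k hk
    exact Option.isSome_iff_exists.mp (hpre k hk)
  have hescB : ∀ b ∈ d.keys, esc b ≤ n := by
    intro b hb
    obtain ⟨j, hj⟩ := hpre' b hb
    have hlt := pvChase_lt d (n + 1) b j hj
    simp only [hesc, hj, Option.getD_some]
    omega
  have hstep : ∀ c p, d.get? c = some p → c ∈ d.keys → esc c = esc p + 1 := by
    intro c p hg hc
    obtain ⟨jc, hjc⟩ := hpre' c hc
    have hjc2 := hjc
    rw [pvChase] at hjc2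
    simp only [hg] at hjc2
    cases hpc : pvChase d n p with
    | none => rw [hpc] at hjc2; simp at hjc2
    | some jp =>
      rw [hpc] at hjc2
      simp only [Option.map_some, Option.some.injEq] at hjc2
      have hmono := pvChase_mono d n p jp hpc
      simp only [hesc, hjc, hmono, Option.getD_some]
      omega
  have hchfull : ∀ b ch, (pvChildBonesB d.items).get? b = some ch →
      ch.Nodup ∧ ch.length ≤ n ∧ ∀ c ∈ ch, c ∈ d.keys ∧ esc c = esc b + 1 := by
    intro b ch hg
    have hgd : (pvChildBonesB d.items).getD b [] = ch :=
      PySem.Dict.getD_of_get?_eq_some _ _ hg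
    rw [pvCB_getD] at hgd
    have hitems : d.items.length = n := by
      rw [hn]; simp [PySem.Dict.keys]
    refine ⟨?_, ?_, ?_⟩
    · rw [← hgd]
      exact List.Nodup.sublist (List.filter_sublist.map _) hknd
    · rw [← hgd]
      have := List.length_filter_le (fun q => q.2 == b) d.items
      simp only [List.length_map]
      omega
    · intro c hc
      rw [← hgd] at hc
      obtain ⟨q, hq, hq1⟩ := List.mem_map.mp hc
      have hqf := List.mem_filter.mp hq
      have hq2 : q.2 = b := by simpa using hqf.2
      have hqitem : (c, b) ∈ d.items := by
        have : q = (c, b) := Prod.ext hq1 hq2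
        rw [← this]; exact hqf.1
      have hget : d.get? c = some b := PySem.Dict.get?_of_mem_items d hqitem hknd
      have hck : c ∈ d.keys := PySem.Dict.mem_keys_of_mem_items d (p := (c, b)) hqitem
      exact ⟨hck, hstep c b hget hck⟩
  have hmain : ∀ l : List Int, (∀ x ∈ l, x ∈ d.keys) →
      ∀ m : PySem.Dict Int (PySem.Set Int), m.keys.Nodup →
      (l.foldl (fun m bone => match pvDescA (pvChildBonesB d.items) (n + 2) bone m with
        | some r => r.2
        | none => m) m) =
      (l.foldl (fun m root =>
          match pvRunB (pvChildBonesB d.items) ((n + 2) * (n + 1) + 2) [(root, false)] m with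
        | some m' => m'
        | none => m) m) := by
    intro l
    induction l with
    | nil => intro _ m _; rfl
    | cons root l ihl =>
      intro hsub m hmnd
      obtain ⟨s, m', hsome⟩ := pvDescA_success (pvChildBonesB d.items) d.keys esc n hescB
        (fun b ch hg c hc => (hchfull b ch hg).2.2 c hc) (n + 2) root m
        (hsub root (by simp)) (by omega)
      obtain ⟨ns, hkeys, hprops, hnodp, hsim⟩ := pvDescA_sim (pvChildBonesB d.items) d.keys
        esc n hchfull (n + 2) root m s m' (hsub root (by simp)) hsome
      have hrun0 : pvRunB (pvChildBonesB d.items) 1 [] m' = some m' := rfl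
      have hrun1 := hsim 1 [] m' hrun0
      have hnsnd : ns.Nodup := by
        have h1 := hnodp hmnd
        rw [hkeys] at h1
        exact (List.nodup_append.mp h1).2.1
      have hnslen : ns.length ≤ n := by
        have h2 := (List.Nodup.subperm hnsnd (fun k hk => (hprops k hk).1)).length_le
        omega
      have hrun2 : pvRunB (pvChildBonesB d.items) ((n + 2) * (n + 1) + 2)
          [(root, false)] m = some m' := by
        refine pvRunB_mono_le _ ?_ _ _ _ hrun1
        have h1 : (n + 2) * ns.length ≤ (n + 2) * n := Nat.mul_le_mul_left _ hnslen
        have h2 : (n + 2) * n ≤ (n + 2) * (n + 1) := Nat.mul_le_mul_left _ (by omega)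
        omega
      simp only [List.foldl_cons, hsome, hrun2]
      exact ihl (fun x hx => hsub x (by simp [hx])) m' (hnodp hmnd)
  rw [hmain d.keys (fun x hx => hx) PySem.Dict.empty PySem.Dict.nodup_keys_empty]
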